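-- pv_equiv track=rewrite | github.com/literallyme1/coding_test_algorithm | basic_level/divisor/17425.py | calculate_f_g
-- ===== SOURCE A (Python) =====
-- def calculate_f_g(N_max):
--
--     divisor_sum = [0] * (N_max + 1)
--     g_values = [0] * (N_max + 1)
--
--     #약수의 합 f(x) 계산
--     for i in range(1, N_max + 1):
--         for j in range(i, N_max + 1, i):
--             divisor_sum[j] += i
--         #누적 합 g(x) 계산
--         g_values[i] = g_values[i - 1] + divisor_sum[i]
--
--     return g_values
-- ===== SOURCE B (Python) =====
-- def calculate_f_g(N_max):
--     f = [0] * (N_max + 1)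
--     d = 1
--     while d * d <= N_max:
--         f[d * d] += d
--         for q in range(d + 1, N_max // d + 1):
--             f[d * q] += d + q
--         d += 1
--     g = [0] * (N_max + 1)
--     for n in range(1, N_max + 1):
--         g[n] = g[n - 1] + f[n]
--     return g
-- ===== Notes on version B (the rewrite author's own statement) =====
-- stated objective: faster
-- what changed: A sieves over every i up to N, adding i to divisor_sum at all its multiples, interleaved with the prefix sum; B sieves only over d with d*d <= N, writing both divisors d and q of each product d*q in one pass, then takes prefix sums in a separate loop.
import Mathlib
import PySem

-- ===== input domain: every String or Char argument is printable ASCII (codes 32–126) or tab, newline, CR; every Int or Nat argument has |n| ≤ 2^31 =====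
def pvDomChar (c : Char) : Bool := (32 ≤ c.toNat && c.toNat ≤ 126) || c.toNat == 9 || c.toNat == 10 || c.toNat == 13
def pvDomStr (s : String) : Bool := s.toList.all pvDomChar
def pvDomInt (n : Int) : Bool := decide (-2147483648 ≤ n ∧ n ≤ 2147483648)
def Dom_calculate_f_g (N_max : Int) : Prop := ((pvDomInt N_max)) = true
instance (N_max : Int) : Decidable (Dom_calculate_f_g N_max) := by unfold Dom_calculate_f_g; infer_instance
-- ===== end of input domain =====

-- B replaces A's full divisor sieve (for each i up to N, bump every multiple) by a
-- divisor-pair sieve (only d with d*d <= N, writing both divisors d and q of d*q at once),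
-- followed by a separate prefix-sum pass (objective: faster — measurably so by the
-- timing run, via fewer sieve iterations; same return value).

-- ===== PORT A =====
-- List indices touched by the Python are always in range, so `set`/`getD` coincide with
-- Python's checked list indexing here.
def calculate_f_g (N_max : Int) : List Int :=
  let ds0 : List Int := List.replicate (N_max + 1).toNat 0     -- [0] * (N_max + 1)
  let g0 : List Int := List.replicate (N_max + 1).toNat 0
  let st := (PySem.List.pyRange 1 (N_max + 1) 1).foldl
    (fun (st : List Int × List Int) i =>
      let ds := (PySem.List.pyRange i (N_max + 1) i).foldl
        (fun ds j => ds.set j.toNat (ds.getD j.toNat 0 + i)) st.1   -- divisor_sum[j] += i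
      (ds, st.2.set i.toNat (st.2.getD (i - 1).toNat 0 + ds.getD i.toNat 0)))
    (ds0, g0)
  st.2

-- ===== PORT B =====
-- the `while d * d <= N_max` loop of Source B (pair sieve: f[d*d] += d, then f[d*q] += d+q)
def pairLoop (N_max d : Int) (f : List Int) : List Int :=
  if h : d * d ≤ N_max then
    pairLoop N_max (d + 1)
      ((PySem.List.pyRange (d + 1) (PySem.Int.floordiv N_max d + 1) 1).foldl
        (fun f q => f.set (d * q).toNat (f.getD (d * q).toNat 0 + (d + q)))
        (f.set (d * d).toNat (f.getD (d * d).toNat 0 + d)))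
  else f
termination_by (N_max + 1 - d).toNat
decreasing_by
  have hdn : d ≤ N_max := by
    rcases (by omega : d ≤ 0 ∨ 1 ≤ d) with h0 | h0
    · exact le_trans h0 (le_trans (mul_self_nonneg d) h)
    · nlinarith
  omega

-- List indices touched by Source B are always in range, so `set`/`getD` coincide with
-- Python's checked list indexing here.
def calculate_f_g_alt (N_max : Int) : List Int :=
  let f := pairLoop N_max 1 (List.replicate (N_max + 1).toNat 0)   -- f = [0] * (N_max + 1)
  let g0 : List Int := List.replicate (N_max + 1).toNat 0          -- g = [0] * (N_max + 1)
  (PySem.List.pyRange 1 (N_max + 1) 1).foldl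
    (fun g n => g.set n.toNat (g.getD (n - 1).toNat 0 + f.getD n.toNat 0)) g0

-- ===== PRECONDITION & SPEC =====
def Spec_calculate_f_g (N_max : Int) (out : List Int) : Prop := out = calculate_f_g_alt N_max
instance (N_max : Int) (out : List Int) : Decidable (Spec_calculate_f_g N_max out) := by unfold Spec_calculate_f_g; infer_instance

-- ===== CLAIM (what is proved, stated in full; the proofs are below) =====
def Claim_equal_calculate_f_g : Prop := ∀ (N_max : Int), Dom_calculate_f_g N_max → Spec_calculate_f_g N_max (calculate_f_g N_max)

-- ===== LEMMAS AND PROOFS =====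

-- σ(k) (sum of divisors) as a finite sum, and its prefix sums G
def sig (k : ℕ) : Int := ∑ d ∈ (Finset.Icc 1 k).filter (fun d => d ∣ k), (d : Int)

def G (n : ℕ) : Int := ∑ m ∈ Finset.Icc 1 n, sig m

-- partial divisor sum after A's outer loop has processed i = 1..t
def fA (t k : ℕ) : Int := ∑ d ∈ (Finset.Icc 1 t).filter (fun d => d ∣ k ∧ 1 ≤ k), (d : Int)

theorem G_zero : G 0 = 0 := by simp [G]

theorem G_succ (t : ℕ) : G (t + 1) = G t + sig (t + 1) := by
  simpa [G] using Finset.sum_Icc_succ_top (by omega : 1 ≤ t + 1) sig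

theorem fA_zero (k : ℕ) : fA 0 k = 0 := by simp [fA]

theorem fA_succ (t k : ℕ) :
    fA (t + 1) k = fA t k + (if (t + 1) ∣ k ∧ 1 ≤ k then ((t : Int) + 1) else 0) := by
  simp only [fA, Finset.sum_filter]
  rw [Finset.sum_Icc_succ_top (by omega : 1 ≤ t + 1)]
  push_cast
  ring_nf

theorem fA_eq_sig (k t : ℕ) (hk : 1 ≤ k) (hkt : k ≤ t) : fA t k = sig k := by
  unfold fA sig
  apply Finset.sum_congr
  · ext d
    simp only [Finset.mem_filter, Finset.mem_Icc]
    constructor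
    · rintro ⟨⟨h1, _⟩, hdk, _⟩
      exact ⟨⟨h1, Nat.le_of_dvd (by omega) hdk⟩, hdk⟩
    · rintro ⟨⟨h1, h2⟩, hdk⟩
      exact ⟨⟨h1, le_trans (Nat.le_of_dvd (by omega) hdk) hkt⟩, hdk, hk⟩
  · intros; rfl

theorem getD_set' (l : List Int) (i k : ℕ) (a : Int) :
    (l.set i a).getD k 0 = if i = k ∧ k < l.length then a else l.getD k 0 := by
  simp only [List.getD_eq_getElem?_getD, List.getElem?_set]
  split_ifs with h1 h2 h3 h4 <;> simp_all <;> omega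

theorem eq_of_getD (l1 l2 : List Int) (hl : l1.length = l2.length)
    (h : ∀ k, l1.getD k 0 = l2.getD k 0) : l1 = l2 := by
  apply List.ext_getElem hl
  intro i h1 h2
  have := h i
  rwa [List.getD_eq_getElem?_getD, List.getD_eq_getElem?_getD,
    List.getElem?_eq_getElem h1, List.getElem?_eq_getElem h2] at this

theorem foldSet_length (js : List Int) (l : List Int) (i : Int) :
    (js.foldl (fun ds j => ds.set j.toNat (ds.getD j.toNat 0 + i)) l).length = l.length := by
  induction js generalizing l with
  | nil => rfl
  | cons j js ih =>
    simp only [List.foldl_cons]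
    rw [ih]
    simp

theorem foldMul_getD (i : Int) (hi : 1 ≤ i) (c : ℕ) (ds : List Int) (k : ℕ) :
    (((List.range c).map (fun m : ℕ => i + i * (m : Int))).foldl
        (fun ds j => ds.set j.toNat (ds.getD j.toNat 0 + i)) ds).getD k 0
      = ds.getD k 0 +
        (if (∃ m : ℕ, m < c ∧ k = i.toNat * (m + 1)) ∧ k < ds.length then i else 0) := by
  induction c generalizing k with
  | zero => simp
  | succ c ih =>
    rw [List.range_succ, List.map_append, List.foldl_append]
    simp only [List.map_cons, List.map_nil, List.foldl_cons, List.foldl_nil]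
    have hnn : (0 : Int) ≤ i := by omega
    have he : (i + i * (c : Int)).toNat = i.toNat * (c + 1) := by
      have h1 : i + i * (c : Int) = ((i.toNat * (c + 1) : ℕ) : Int) := by
        push_cast [Int.toNat_of_nonneg hnn]; ring
      rw [h1, Int.toNat_natCast]
    have hFlen :
        (((List.range c).map (fun m : ℕ => i + i * (m : Int))).foldl
          (fun ds j => ds.set j.toNat (ds.getD j.toNat 0 + i)) ds).length = ds.length :=
      foldSet_length _ _ _
    rw [getD_set', he, hFlen, ih, ih]
    have hnold : ¬ (∃ m, m < c ∧ i.toNat * (c + 1) = i.toNat * (m + 1)) := by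
      rintro ⟨m, hm, he2⟩
      have : c + 1 = m + 1 := Nat.eq_of_mul_eq_mul_left (by omega) he2
      omega
    by_cases hk : i.toNat * (c + 1) = k
    · subst hk
      have hnew : (∃ m, m < c + 1 ∧ i.toNat * (c + 1) = i.toNat * (m + 1)) :=
        ⟨c, by omega, rfl⟩
      by_cases hkl : i.toNat * (c + 1) < ds.length
      · rw [if_pos ⟨rfl, hkl⟩, if_neg (fun h => hnold h.1), if_pos ⟨hnew, hkl⟩]; ring
      · rw [if_neg (fun h => hkl h.2), if_neg (fun h => hnold h.1),
          if_neg (fun h => hkl h.2)]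
    · have hiff : (∃ m, m < c + 1 ∧ k = i.toNat * (m + 1)) ↔
          (∃ m, m < c ∧ k = i.toNat * (m + 1)) := by
        constructor
        · rintro ⟨m, hm, rfl⟩
          refine ⟨m, ?_, rfl⟩
          rcases Nat.lt_succ_iff_lt_or_eq.mp hm with h | h
          · exact h
          · subst h; exact absurd rfl hk
        · rintro ⟨m, hm, rfl⟩; exact ⟨m, by omega, rfl⟩
      rw [if_neg (fun h => hk h.1)]
      simp only [hiff]

theorem inner_getD (i : Int) (hi : 1 ≤ i) (Lb : Int) (ds : List Int)
    (hlen : ds.length = Lb.toNat) (k : ℕ) :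
    ((PySem.List.pyRange i Lb i).foldl
        (fun ds j => ds.set j.toNat (ds.getD j.toNat 0 + i)) ds).getD k 0
      = ds.getD k 0 + (if i.toNat ∣ k ∧ 1 ≤ k ∧ k < ds.length then i else 0) := by
  rw [PySem.List.pyRange_of_pos i Lb (by omega : (0 : Int) < i), foldMul_getD i hi]
  congr 1
  have hc : Lb - i + i - 1 = Lb - 1 := by ring
  have hnn : (0 : Int) ≤ i := by omega
  have hiff : (∃ m : ℕ, m < (if i < Lb then ((Lb - i + i - 1) / i).toNat else 0) ∧
      k = i.toNat * (m + 1)) ↔ (i.toNat ∣ k ∧ 1 ≤ k ∧ k < Lb.toNat) := by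
    rw [hc]
    constructor
    · rintro ⟨m, hm, rfl⟩
      split_ifs at hm with hib
      · have h1 : (m : Int) < (Lb - 1) / i := by
          have := hm
          omega
        have h2 : ((m : Int) + 1) * i ≤ Lb - 1 :=
          (Int.le_ediv_iff_mul_le (by omega)).mp (by omega)
        have hk' : ((i.toNat * (m + 1) : ℕ) : Int) = ((m : Int) + 1) * i := by
          push_cast [Int.toNat_of_nonneg hnn]; ring
        refine ⟨Dvd.intro _ rfl, ?_, ?_⟩
        · have : 1 ≤ i.toNat := by omega
          exact Nat.one_le_iff_ne_zero.mpr (by positivity)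
        · omega
      · omega
    · rintro ⟨⟨q, hq⟩, hk1, hkL⟩
      subst hq
      have hq1 : 1 ≤ q := by
        rcases Nat.eq_zero_or_pos q with h | h
        · subst h; simp at hk1
        · exact h
      have hkint : ((i.toNat * q : ℕ) : Int) = (q : Int) * i := by
        push_cast [Int.toNat_of_nonneg hnn]; ring
      have hqle : (q : Int) * i ≤ Lb - 1 := by omega
      have hq2 : (q : Int) ≤ (Lb - 1) / i := (Int.le_ediv_iff_mul_le (by omega)).mpr hqle
      have hiLb : i < Lb := by
        have h1 : i ≤ (q : Int) * i := le_mul_of_one_le_left hnn (by exact_mod_cast hq1)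
        omega
      refine ⟨q - 1, ?_, by rw [Nat.sub_add_cancel hq1]⟩
      rw [if_pos hiLb]
      omega
  have hiff2 : ((∃ m : ℕ, m < (if i < Lb then ((Lb - i + i - 1) / i).toNat else 0) ∧
      k = i.toNat * (m + 1)) ∧ k < ds.length) ↔ (i.toNat ∣ k ∧ 1 ≤ k ∧ k < ds.length) := by
    rw [hlen]
    constructor
    · rintro ⟨h1, h2⟩
      exact ⟨(hiff.mp h1).1, (hiff.mp h1).2.1, h2⟩
    · rintro ⟨h1, h2, h3⟩
      exact ⟨hiff.mpr ⟨h1, h2, h3⟩, h3⟩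
  rw [if_congr hiff2 rfl rfl]

-- ---------- A-side outer loop ----------

theorem outerA (N : ℕ) (t : ℕ) (ht : t ≤ N) :
    ((List.range t).map (fun m : ℕ => (1 : Int) + m)).foldl
      (fun (st : List Int × List Int) i =>
        let ds := (PySem.List.pyRange i ((N : Int) + 1) i).foldl
          (fun ds j => ds.set j.toNat (ds.getD j.toNat 0 + i)) st.1
        (ds, st.2.set i.toNat (st.2.getD (i - 1).toNat 0 + ds.getD i.toNat 0)))
      (List.replicate (N + 1) 0, List.replicate (N + 1) 0)
    = ((List.range (N + 1)).map (fun k => fA t k),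
       (List.range (N + 1)).map (fun k => if k ≤ t then G k else 0)) := by
  induction t with
  | zero =>
    simp only [List.range_zero, List.map_nil, List.foldl_nil]
    have h0 : ∀ k : ℕ, (if k ≤ 0 then G k else 0) = (0 : Int) := by
      intro k
      rcases Nat.eq_zero_or_pos k with rfl | hk
      · simp [G_zero]
      · rw [if_neg (by omega)]
    refine Prod.ext ?_ ?_
    · show List.replicate (N + 1) (0 : Int) = _
      rw [List.map_congr_left (fun a _ => fA_zero a), List.map_const', List.length_range]
    · show List.replicate (N + 1) (0 : Int) = _
      rw [List.map_congr_left (fun a _ => h0 a), List.map_const', List.length_range]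
  | succ t ih =>
    rw [List.range_succ, List.map_append, List.foldl_append, ih (by omega)]
    simp only [List.map_cons, List.map_nil, List.foldl_cons, List.foldl_nil]
    have hi1 : (1 : Int) ≤ 1 + (t : Int) := by omega
    have htn : ((1 : Int) + (t : Int)).toNat = t + 1 := by omega
    have htn1 : ((1 : Int) + (t : Int) - 1).toNat = t := by omega
    have hlen : ((List.range (N + 1)).map (fun k => fA t k)).length = ((N : Int) + 1).toNat := by
      simp
    -- the divisor_sum list after the inner loop for i = t + 1
    have hds : ((PySem.List.pyRange (1 + (t : Int)) ((N : Int) + 1) (1 + (t : Int))).foldl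
          (fun ds j => ds.set j.toNat (ds.getD j.toNat 0 + (1 + (t : Int))))
          ((List.range (N + 1)).map (fun k => fA t k)))
        = (List.range (N + 1)).map (fun k => fA (t + 1) k) := by
      apply eq_of_getD
      · rw [foldSet_length]; simp
      · intro k
        rw [inner_getD _ hi1 _ _ hlen k, htn]
        rcases Nat.lt_or_ge k (N + 1) with hk | hk
        · rw [PySem.List.getD_map_range _ _ _ _ hk, PySem.List.getD_map_range _ _ _ _ hk,
            fA_succ]
          have hkl : k < ((List.range (N + 1)).map (fun k => fA t k)).length := by simp [hk]
          by_cases hd : (t + 1) ∣ k ∧ 1 ≤ k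
          · rw [if_pos ⟨hd.1, hd.2, hkl⟩, if_pos hd]; ring
          · rw [if_neg (fun h => hd ⟨h.1, h.2.1⟩), if_neg hd]
        · have hout : ((List.range (N + 1)).map (fun k => fA t k)).length ≤ k := by simp [hk]
          have hout1 : ((List.range (N + 1)).map (fun k => fA (t + 1) k)).length ≤ k := by
            simp [hk]
          rw [List.getD_eq_default _ _ hout, List.getD_eq_default _ _ hout1,
            if_neg (fun h => absurd h.2.2 (by omega))]
          simp
    rw [Prod.mk.injEq]
    refine ⟨hds, ?_⟩
    rw [hds, htn, htn1]
    ·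
      have ht1 : t + 1 < N + 1 := by omega
      have htt : t < N + 1 := by omega
      rw [PySem.List.getD_map_range _ _ _ _ htt, PySem.List.getD_map_range _ _ _ _ ht1,
        if_pos (le_refl t), fA_eq_sig (t + 1) (t + 1) (by omega) (le_refl _)]
      apply eq_of_getD
      · simp
      · intro k
        rw [getD_set']
        rcases Nat.lt_or_ge k (N + 1) with hk | hk
        · rw [PySem.List.getD_map_range _ _ _ _ hk]
          by_cases he : t + 1 = k
          · subst he
            rw [if_pos ⟨rfl, by simp [hk]⟩, PySem.List.getD_map_range _ _ _ _ hk,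
              if_pos (le_refl _), ← G_succ]
          · rw [if_neg (fun h => he h.1), PySem.List.getD_map_range _ _ _ _ hk]
            by_cases hle : k ≤ t
            · rw [if_pos hle, if_pos (by omega)]
            · rw [if_neg hle, if_neg (by omega)]
        · have hout : ((List.range (N + 1)).map (fun k => if k ≤ t then G k else 0)).length ≤ k := by
            simp [hk]
          have hout1 : ((List.range (N + 1)).map
              (fun k => if k ≤ t + 1 then G k else 0)).length ≤ k := by simp [hk]
          rw [if_neg (by simp [hk]; omega : ¬ _), List.getD_eq_default _ _ hout,
            List.getD_eq_default _ _ hout1]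

theorem map_final (N : ℕ) :
    (List.range (N + 1)).map (fun k => if k ≤ N then G k else 0)
      = (List.range (N + 1)).map (fun k => G k) := by
  apply List.map_congr_left
  intro a ha
  simp only [List.mem_range] at ha
  simp [Nat.lt_succ_iff.mp ha]

theorem portA_eq (N : ℕ) :
    calculate_f_g (N : Int) = (List.range (N + 1)).map (fun k => G k) := by
  unfold calculate_f_g
  dsimp only
  rw [PySem.List.pyRange_one]
  have h1 : ((N : Int) + 1 - 1).toNat = N := by omega
  have h2 : ((N : Int) + 1).toNat = N + 1 := by omega
  rw [h1, h2, outerA N N (le_refl N)]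
  exact map_final N

-- ---------- B-side ----------

theorem pairing (n : ℕ) (hn : 1 ≤ n) :
    ∑ e ∈ (Finset.Icc 1 n).filter (fun e => e * e ≤ n ∧ e ∣ n),
        ((e : Int) + if e * e ≠ n then ((n / e : ℕ) : Int) else 0) = sig n := by
  unfold sig
  have hn0 : n ≠ 0 := by omega
  have hset : (Finset.Icc 1 n).filter (fun e => e * e ≤ n ∧ e ∣ n)
      = ((Finset.Icc 1 n).filter (fun d => d ∣ n)).filter (fun e => e * e ≤ n) := by
    ext e
    simp only [Finset.mem_filter, Finset.mem_Icc]
    tauto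
  rw [hset, Finset.sum_add_distrib,
    ← Finset.sum_filter_add_sum_filter_not ((Finset.Icc 1 n).filter (fun d => d ∣ n))
      (fun e => e * e ≤ n) (fun d => (d : Int))]
  congr 1
  rw [← Finset.sum_filter]
  refine Finset.sum_nbij' (fun e => n / e) (fun d => n / d) ?_ ?_ ?_ ?_ ?_
  · intro e he
    simp only [Finset.mem_filter, Finset.mem_Icc] at he ⊢
    obtain ⟨⟨⟨⟨he1, he2⟩, hdvd⟩, hsq⟩, hne⟩ := he
    have hq : e * (n / e) = n := Nat.mul_div_cancel' hdvd
    have hlt : e < n / e := by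
      have h1 : e * e < e * (n / e) := by omega
      exact Nat.lt_of_mul_lt_mul_left h1
    have hqd : n / e ∣ n := Nat.div_dvd_of_dvd hdvd
    refine ⟨⟨⟨by omega, Nat.le_of_dvd (by omega) hqd⟩, hqd⟩, ?_⟩
    have h2 : e * (n / e) < (n / e) * (n / e) := by
      apply Nat.mul_lt_mul_of_lt_of_le hlt (le_refl _)
      omega
    omega
  · intro d hd
    simp only [Finset.mem_filter, Finset.mem_Icc] at hd ⊢
    obtain ⟨⟨⟨hd1, hd2⟩, hdvd⟩, hsq⟩ := hd
    have hq : d * (n / d) = n := Nat.mul_div_cancel' hdvd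
    have hqd : n / d ∣ n := Nat.div_dvd_of_dvd hdvd
    have hq1 : 1 ≤ n / d := (Nat.one_le_div_iff (by omega)).mpr hd2
    have hlt : n / d < d := by
      by_contra hcon
      push_neg at hcon
      have : d * d ≤ d * (n / d) := Nat.mul_le_mul_left d hcon
      omega
    have h2 : (n / d) * (n / d) < d * (n / d) := by
      apply Nat.mul_lt_mul_of_lt_of_le hlt (le_refl _)
      omega
    refine ⟨⟨⟨⟨by omega, Nat.le_of_dvd (by omega) hqd⟩, hqd⟩, by omega⟩, by omega⟩
  · intro e he
    simp only [Finset.mem_filter, Finset.mem_Icc] at he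
    exact Nat.div_div_self he.1.1.2 hn0
  · intro d hd
    simp only [Finset.mem_filter, Finset.mem_Icc] at hd
    exact Nat.div_div_self hd.1.2 hn0
  · intro e he
    rfl

theorem setG (N t : ℕ) (ht : t + 1 < N + 1) :
    ((List.range (N + 1)).map (fun k => if k ≤ t then G k else 0)).set (t + 1) (G (t + 1))
      = (List.range (N + 1)).map (fun k => if k ≤ t + 1 then G k else 0) := by
  apply eq_of_getD
  · simp
  · intro k
    rw [getD_set']
    rcases Nat.lt_or_ge k (N + 1) with hk | hk
    · by_cases he : t + 1 = k
      · subst he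
        rw [if_pos ⟨rfl, by simp [hk]⟩, PySem.List.getD_map_range _ _ _ _ hk,
          if_pos (le_refl _)]
      · rw [if_neg (fun h => he h.1), PySem.List.getD_map_range _ _ _ _ hk,
          PySem.List.getD_map_range _ _ _ _ hk]
        by_cases hle : k ≤ t
        · rw [if_pos hle, if_pos (by omega)]
        · rw [if_neg hle, if_neg (by omega)]
    · have hout : ((List.range (N + 1)).map (fun k => if k ≤ t then G k else 0)).length ≤ k := by
        simp [hk]
      have hout1 : ((List.range (N + 1)).map
          (fun k => if k ≤ t + 1 then G k else 0)).length ≤ k := by simp [hk]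
      rw [if_neg (fun h => absurd h.2 (by simp; omega)), List.getD_eq_default _ _ hout,
        List.getD_eq_default _ _ hout1]

-- ---------- B-side ----------

theorem sig_zero : sig 0 = 0 := by simp [sig]

theorem foldPairSet_length (js : List Int) (l : List Int) (d : Int) :
    (js.foldl (fun f q => f.set (d * q).toNat (f.getD (d * q).toNat 0 + (d + q))) l).length
      = l.length := by
  induction js generalizing l with
  | nil => rfl
  | cons j js ih =>
    simp only [List.foldl_cons]
    rw [ih]
    simp

theorem foldPair_getD (d : Int) (hd : 1 ≤ d) (c : ℕ) (f : List Int) (k : ℕ) :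
    (((List.range c).map (fun m : ℕ => (d + 1) + (m : Int))).foldl
        (fun f q => f.set (d * q).toNat (f.getD (d * q).toNat 0 + (d + q))) f).getD k 0
      = f.getD k 0 +
        (if (∃ m : ℕ, m < c ∧ k = d.toNat * (d.toNat + 1 + m)) ∧ k < f.length
         then ((d : Int) + ((k / d.toNat : ℕ) : Int)) else 0) := by
  induction c generalizing k with
  | zero => simp
  | succ c ih =>
    rw [List.range_succ, List.map_append, List.foldl_append]
    simp only [List.map_cons, List.map_nil, List.foldl_cons, List.foldl_nil]
    have hnn : (0 : Int) ≤ d := by omega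
    have he : (d * ((d + 1) + (c : Int))).toNat = d.toNat * (d.toNat + 1 + c) := by
      have h1 : d * ((d + 1) + (c : Int)) = ((d.toNat * (d.toNat + 1 + c) : ℕ) : Int) := by
        push_cast [Int.toNat_of_nonneg hnn]; ring
      rw [h1, Int.toNat_natCast]
    have hFlen :
        (((List.range c).map (fun m : ℕ => (d + 1) + (m : Int))).foldl
          (fun f q => f.set (d * q).toNat (f.getD (d * q).toNat 0 + (d + q))) f).length
          = f.length := foldPairSet_length _ _ _
    rw [getD_set', he, hFlen, ih, ih]
    have hnold : ¬ (∃ m, m < c ∧ d.toNat * (d.toNat + 1 + c) = d.toNat * (d.toNat + 1 + m)) := by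
      rintro ⟨m, hm, he2⟩
      have : d.toNat + 1 + c = d.toNat + 1 + m := Nat.eq_of_mul_eq_mul_left (by omega) he2
      omega
    have hval : f.getD (d.toNat * (d.toNat + 1 + c)) 0 + (d + ((d + 1) + (c : Int)))
        = f.getD (d.toNat * (d.toNat + 1 + c)) 0 +
          ((d : Int) + (((d.toNat * (d.toNat + 1 + c)) / d.toNat : ℕ) : Int)) := by
      rw [Nat.mul_div_cancel_left _ (by omega : 0 < d.toNat)]
      push_cast [Int.toNat_of_nonneg hnn]
      ring
    by_cases hk : d.toNat * (d.toNat + 1 + c) = k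
    · subst hk
      have hnew : (∃ m, m < c + 1 ∧
          d.toNat * (d.toNat + 1 + c) = d.toNat * (d.toNat + 1 + m)) := ⟨c, by omega, rfl⟩
      by_cases hkl : d.toNat * (d.toNat + 1 + c) < f.length
      · rw [if_pos ⟨rfl, hkl⟩, if_neg (fun h => hnold h.1), if_pos ⟨hnew, hkl⟩]
        rw [Nat.mul_div_cancel_left _ (by omega : 0 < d.toNat)]
        push_cast [Int.toNat_of_nonneg hnn]
        ring
      · rw [if_neg (fun h => hkl h.2), if_neg (fun h => hnold h.1),
          if_neg (fun h => hkl h.2)]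
    · have hiff : (∃ m, m < c + 1 ∧ k = d.toNat * (d.toNat + 1 + m)) ↔
          (∃ m, m < c ∧ k = d.toNat * (d.toNat + 1 + m)) := by
        constructor
        · rintro ⟨m, hm, rfl⟩
          refine ⟨m, ?_, rfl⟩
          rcases Nat.lt_succ_iff_lt_or_eq.mp hm with h | h
          · exact h
          · subst h; exact absurd rfl hk
        · rintro ⟨m, hm, rfl⟩; exact ⟨m, by omega, rfl⟩
      rw [if_neg (fun h => hk h.1)]
      simp only [hiff]

theorem innerQ_getD (N d : ℕ) (hd : 1 ≤ d) (f : List Int) (k : ℕ) :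
    ((PySem.List.pyRange ((d : Int) + 1) (PySem.Int.floordiv (N : Int) (d : Int) + 1) 1).foldl
        (fun f q => f.set ((d : Int) * q).toNat
          (f.getD ((d : Int) * q).toNat 0 + ((d : Int) + q))) f).getD k 0
      = f.getD k 0 +
        (if (d ∣ k ∧ d * d < k ∧ k ≤ N) ∧ k < f.length
         then ((d : Int) + ((k / d : ℕ) : Int)) else 0) := by
  have hfd : PySem.Int.floordiv (N : Int) (d : Int) = ((N / d : ℕ) : Int) := by
    rw [PySem.Int.floordiv_eq_ediv_of_pos (by exact_mod_cast hd)]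
    exact_mod_cast rfl
  rw [hfd, PySem.List.pyRange_one]
  have hc : (((N / d : ℕ) : Int) + 1 - ((d : Int) + 1)).toNat = N / d - d := by omega
  have hmap : (List.range (N / d - d)).map (fun k : ℕ => (d : Int) + 1 + (k : Int))
      = (List.range (N / d - d)).map (fun m : ℕ => ((d : Int) + 1) + (m : Int)) := rfl
  rw [hc, hmap, foldPair_getD _ (by omega) _ _ k]
  have htd : (d : Int).toNat = d := by omega
  have hiff : (∃ m : ℕ, m < N / d - d ∧ k = (d : Int).toNat * ((d : Int).toNat + 1 + m)) ↔
      (d ∣ k ∧ d * d < k ∧ k ≤ N) := by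
    rw [htd]
    constructor
    · rintro ⟨m, hm, rfl⟩
      refine ⟨Dvd.intro _ rfl, ?_, ?_⟩
      · calc d * d < d * (d + 1 + m) := by
              apply Nat.mul_lt_mul_of_le_of_lt (le_refl d) (by omega) (by omega)
        _ = d * (d + 1 + m) := rfl
      · have hq : d + 1 + m ≤ N / d := by omega
        calc d * (d + 1 + m) ≤ d * (N / d) := Nat.mul_le_mul_left d hq
        _ ≤ N := by
              rw [Nat.mul_comm]
              exact Nat.div_mul_le_self N d
    · rintro ⟨⟨q, hq⟩, hlt, hle⟩
      subst hq
      have hdq : d < q := by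
        by_contra hcon
        push_neg at hcon
        have : d * q ≤ d * d := Nat.mul_le_mul_left d hcon
        omega
      have hqN : q ≤ N / d := by
        rw [Nat.le_div_iff_mul_le (by omega), Nat.mul_comm]
        omega
      refine ⟨q - d - 1, by omega, ?_⟩
      congr 1
      omega
  by_cases hkl : k < f.length
  · by_cases hcond : d ∣ k ∧ d * d < k ∧ k ≤ N
    · rw [if_pos ⟨hiff.mpr hcond, hkl⟩, if_pos ⟨hcond, hkl⟩, htd]
    · rw [if_neg (fun h => hcond (hiff.mp h.1)), if_neg (fun h => hcond h.1)]
  · rw [if_neg (fun h => hkl h.2), if_neg (fun h => hkl h.2)]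

theorem pairLoop_length (N_max d : Int) (f : List Int) :
    (pairLoop N_max d f).length = f.length := by
  rw [pairLoop]
  split_ifs with h
  · rw [pairLoop_length]
    rw [foldPairSet_length]
    simp
  · rfl
termination_by (N_max + 1 - d).toNat
decreasing_by
  have hdn : d ≤ N_max := by
    rcases (by omega : d ≤ 0 ∨ 1 ≤ d) with h0 | h0
    · exact le_trans h0 (le_trans (mul_self_nonneg d) h)
    · nlinarith
  omega

theorem pairLoop_getD (N : ℕ) : ∀ (fuel d : ℕ), N + 1 - d = fuel → 1 ≤ d →
    ∀ f : List Int, f.length = N + 1 → ∀ k : ℕ,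
    (pairLoop (N : Int) (d : Int) f).getD k 0
      = f.getD k 0 + ∑ e ∈ (Finset.Icc d N).filter (fun e => e ∣ k ∧ e * e ≤ k ∧ k ≤ N),
          ((e : Int) + if e * e ≠ k then ((k / e : ℕ) : Int) else 0) := by
  intro fuel
  induction fuel with
  | zero =>
    intro d hfd hd1 f hlen k
    have hdn : (N : Int) < (d : Int) := by exact_mod_cast (by omega : N < d)
    have hd1' : (1 : Int) ≤ (d : Int) := by exact_mod_cast hd1
    rw [pairLoop, dif_neg (by nlinarith : ¬ ((d : Int) * d ≤ (N : Int)))]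
    rw [Finset.Icc_eq_empty (by omega : ¬ d ≤ N)]
    simp
  | succ fuel ih =>
    intro d hfd hd1 f hlen k
    by_cases hdd : d * d ≤ N
    · have hcast : ((d : Int)) * d ≤ (N : Int) := by exact_mod_cast hdd
      have hdle : d ≤ N := le_trans (Nat.le_mul_of_pos_left d hd1) hdd
      rw [pairLoop, dif_pos hcast]
      have hlen2 : ((PySem.List.pyRange ((d : Int) + 1)
            (PySem.Int.floordiv (N : Int) (d : Int) + 1) 1).foldl
          (fun f q => f.set ((d : Int) * q).toNat
            (f.getD ((d : Int) * q).toNat 0 + ((d : Int) + q)))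
          (f.set ((d : Int) * d).toNat (f.getD ((d : Int) * d).toNat 0 + d))).length
          = N + 1 := by
        rw [foldPairSet_length]
        simp [hlen]
      have ihres := ih (d + 1) (by omega) (by omega) _ hlen2 k
      have hc2 : ((d + 1 : ℕ) : Int) = (d : Int) + 1 := by push_cast; ring
      rw [hc2] at ihres
      rw [ihres, innerQ_getD N d hd1]
      have hdd2 : ((d : Int) * d).toNat = d * d := by
        have : (d : Int) * d = ((d * d : ℕ) : Int) := by push_cast; ring
        rw [this, Int.toNat_natCast]
      rw [getD_set', hdd2, List.length_set, hlen]
      have hsplit : Finset.Icc d N = insert d (Finset.Icc (d + 1) N) := by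
        ext x
        simp only [Finset.mem_Icc, Finset.mem_insert]
        omega
      rw [hsplit, Finset.filter_insert]
      by_cases hdvd : d ∣ k ∧ d * d ≤ k ∧ k ≤ N
      · rw [if_pos hdvd, Finset.sum_insert (by
          simp only [Finset.mem_filter, Finset.mem_Icc]
          rintro ⟨⟨h1, _⟩, _⟩
          omega)]
        have hklen : k < N + 1 := by omega
        by_cases hsq : d * d = k
        · rw [if_pos ⟨hsq, by omega⟩,
            if_neg (show ¬ ((d ∣ k ∧ d * d < k ∧ k ≤ N) ∧ k < N + 1) from
              fun h => by omega),
            if_neg (show ¬ (d * d ≠ k) from fun h => h hsq)]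
          rw [← hsq]
          ring
        · rw [if_neg (show ¬ (d * d = k ∧ k < N + 1) from fun h => hsq h.1),
            if_pos ⟨⟨hdvd.1, by omega, hdvd.2.2⟩, hklen⟩,
            if_pos (show d * d ≠ k from hsq)]
          ring
      · have h1 : ¬ (d * d = k ∧ k < N + 1) := by
          rintro ⟨rfl, _⟩
          exact hdvd ⟨Dvd.intro _ rfl, le_refl _, hdd⟩
        have h2 : ¬ ((d ∣ k ∧ d * d < k ∧ k ≤ N) ∧ k < N + 1) := by
          rintro ⟨⟨ha, hb, hc⟩, _⟩
          exact hdvd ⟨ha, by omega, hc⟩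
        rw [if_neg h1, if_neg h2, if_neg hdvd]
        ring
    · have hcast : ¬ ((d : Int) * d ≤ (N : Int)) := by exact_mod_cast hdd
      rw [pairLoop, dif_neg hcast]
      have hempty : Finset.filter (fun e => e ∣ k ∧ e * e ≤ k ∧ k ≤ N)
          (Finset.Icc d N) = ∅ := by
        apply Finset.filter_eq_empty_iff.mpr
        intro e he
        simp only [Finset.mem_Icc] at he
        rintro ⟨_, hsq, hkN⟩
        have h2 : d * d ≤ e * e := Nat.mul_le_mul he.1 he.1
        omega
      rw [hempty]
      simp

theorem fList_eq (N : ℕ) :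
    pairLoop (N : Int) 1 (List.replicate (N + 1) (0 : Int))
      = (List.range (N + 1)).map (fun k => sig k) := by
  apply eq_of_getD
  · rw [pairLoop_length]; simp
  · intro k
    have h := pairLoop_getD N N 1 (by omega) (le_refl 1)
      (List.replicate (N + 1) (0 : Int)) (by simp) k
    push_cast at h
    rw [h]
    have hrep : (List.replicate (N + 1) (0 : Int)).getD k 0 = 0 := by
      rcases Nat.lt_or_ge k (N + 1) with hk | hk
      · rw [List.getD_eq_getElem _ _ (by simp [hk])]; simp
      · rw [List.getD_eq_default _ _ (by simp [hk])]
    rw [hrep]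
    rcases Nat.lt_or_ge k (N + 1) with hk | hk
    · rw [PySem.List.getD_map_range _ _ _ _ hk]
      rcases Nat.eq_zero_or_pos k with rfl | hk1
      · rw [sig_zero, Finset.filter_eq_empty_iff.mpr (by
          intro e he
          simp only [Finset.mem_Icc] at he
          rintro ⟨_, hsq, _⟩
          nlinarith [he.1])]
        simp
      · rw [← pairing k hk1]
        have hsets : (Finset.Icc 1 N).filter (fun e => e ∣ k ∧ e * e ≤ k ∧ k ≤ N)
            = (Finset.Icc 1 k).filter (fun e => e * e ≤ k ∧ e ∣ k) := by
          ext e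
          simp only [Finset.mem_filter, Finset.mem_Icc]
          constructor
          · rintro ⟨⟨he1, _⟩, hdvd, hsq, _⟩
            exact ⟨⟨he1, Nat.le_of_dvd (by omega) hdvd⟩, hsq, hdvd⟩
          · rintro ⟨⟨he1, he2⟩, hsq, hdvd⟩
            exact ⟨⟨he1, by omega⟩, hdvd, hsq, by omega⟩
        rw [hsets]
        simp
    · rw [List.getD_eq_default _ _ (by simp [hk])]
      rw [Finset.filter_eq_empty_iff.mpr (by
        intro e he
        rintro ⟨_, _, hkN⟩
        omega)]
      simp

theorem prefixB (N : ℕ) (t : ℕ) (ht : t ≤ N) :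
    ((List.range t).map (fun m : ℕ => (1 : Int) + m)).foldl
      (fun g n => g.set n.toNat (g.getD (n - 1).toNat 0 +
        ((List.range (N + 1)).map (fun k => sig k)).getD n.toNat 0))
      (List.replicate (N + 1) 0)
    = (List.range (N + 1)).map (fun k => if k ≤ t then G k else 0) := by
  induction t with
  | zero =>
    simp only [List.range_zero, List.map_nil, List.foldl_nil]
    have h0 : ∀ k : ℕ, (if k ≤ 0 then G k else 0) = (0 : Int) := by
      intro k
      rcases Nat.eq_zero_or_pos k with rfl | hk
      · simp [G_zero]
      · rw [if_neg (by omega)]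
    rw [List.map_congr_left (fun a _ => h0 a), List.map_const', List.length_range]
  | succ t ih =>
    rw [List.range_succ (n := t), List.map_append, List.foldl_append, ih (by omega)]
    simp only [List.map_cons, List.map_nil, List.foldl_cons, List.foldl_nil]
    have htn : ((1 : Int) + (t : Int)).toNat = t + 1 := by omega
    have htn1 : ((1 : Int) + (t : Int) - 1).toNat = t := by omega
    have ht1 : t + 1 < N + 1 := by omega
    have htt : t < N + 1 := by omega
    rw [htn, htn1, PySem.List.getD_map_range _ _ _ _ htt,
      PySem.List.getD_map_range _ _ _ _ ht1, if_pos (le_refl t), ← G_succ,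
      setG N t (by omega)]

theorem portB_eq (N : ℕ) :
    calculate_f_g_alt (N : Int) = (List.range (N + 1)).map (fun k => G k) := by
  unfold calculate_f_g_alt
  dsimp only
  rw [PySem.List.pyRange_one]
  have h1 : ((N : Int) + 1 - 1).toNat = N := by omega
  have h2 : ((N : Int) + 1).toNat = N + 1 := by omega
  rw [h1, h2, fList_eq, prefixB N N (le_refl N)]
  exact map_final N

theorem neg_A (N_max : Int) (h : N_max < 0) : calculate_f_g N_max = [] := by
  unfold calculate_f_g
  rw [PySem.List.pyRange_one_eq_nil (by omega)]
  simp [Int.toNat_of_nonpos (by omega : N_max + 1 ≤ 0)]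

theorem neg_B (N_max : Int) (h : N_max < 0) : calculate_f_g_alt N_max = [] := by
  unfold calculate_f_g_alt
  rw [PySem.List.pyRange_one_eq_nil (by omega)]
  simp [Int.toNat_of_nonpos (by omega : N_max + 1 ≤ 0)]

-- ===== VERDICT (by name: the statement is the Claim_ definition above) =====
theorem calculate_f_g_spec : Claim_equal_calculate_f_g := by
  intro N_max _
  unfold Spec_calculate_f_g
  rcases (by omega : N_max < 0 ∨ 0 ≤ N_max) with h | h
  · rw [neg_A N_max h, neg_B N_max h]
  · lift N_max to ℕ using h with N
    rw [portA_eq N, portB_eq N]
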